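-- pv_equiv track=rewrite | github.com/argens-hku/Bridge | src/Bidding.py | rearrangeOrResponse
-- ===== SOURCE A (Python) =====
-- def findBrackets (response):
--
-- 	open_brac = []
-- 	close_brac = []
-- 	counter = 0
--
-- 	for token in response:
-- 		if token == "(":
-- 			open_brac.append (counter)
-- 		if token == ")":
-- 			close_brac.append (counter)
-- 		counter += 1
--
-- 	pairs = []
-- 	temp = (-1, -1)
-- 	temp_o = -1
--
-- 	for c in close_brac:
-- 		for o in open_brac:
-- 			if o < c:
-- 				temp = (o, c)
-- 				temp_o = o
-- 			else:
-- 				break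
-- 		pairs.append (temp)
-- 		open_brac.remove (temp_o)
--
-- 	if len (open_brac) != 0:
-- 		return (False, [])
-- 	return (True, pairs)
--
-- def rearrangeOrResponse (response):
--
-- 	(_, brackets) = findBrackets (response)
--
-- 	length = len (response)
-- 	output = ""
-- 	temp_list = []
-- 	temp_arr = []
--
-- 	i = 0
-- 	while i < len (response):
-- 		if response [i] == "(":
-- 			for (o, c) in brackets:
-- 				if i == o:
-- 					i = c+1
-- 					temp_arr.append (response [o: c+1])
-- 					break
-- 			continue
-- 		if response [i] != "/":
-- 			temp_arr.append (response [i])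
-- 		i += 1
--
-- 	for blob in temp_arr:
-- 		temp_list.append ((len (blob), blob))
-- 	temp_list.sort ()
-- 	for (_, blob) in temp_list:
-- 		output += blob + "/"
-- 	return (length, output [:-1])
-- ===== SOURCE B (Python) =====
-- def rearrangeOrResponse(response):
--     # single left-to-right pass: a depth counter splits the string into
--     # top-level "(...)" blobs and single non-'/' characters
--     blobs = []
--     depth = 0
--     cur = []
--     for ch in response:
--         if depth == 0:
--             if ch == "(":
--                 depth = 1
--                 cur = ["("]
--             elif ch != "/":
--                 blobs.append(ch)
--         else:
--             cur.append(ch)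
--             if ch == "(":
--                 depth += 1
--             elif ch == ")":
--                 depth -= 1
--                 if depth == 0:
--                     blobs.append("".join(cur))
--     blobs.sort(key=lambda b: (len(b), b))
--     return (len(response), "/".join(blobs))
-- ===== Notes on version B (the rewrite author's own statement) =====
-- stated objective: alternative
-- what changed: replaces the quadratic findBrackets pairing (repeated inner scans over open_brac plus list.remove) and the while loop that searches the pair list at every opening parenthesis with a single left-to-right depth-counter pass that emits the top-level blobs directly, followed by one key-sort; intended as faster but a timing run read only about 1.5x at the largest size
import Mathlib
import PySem

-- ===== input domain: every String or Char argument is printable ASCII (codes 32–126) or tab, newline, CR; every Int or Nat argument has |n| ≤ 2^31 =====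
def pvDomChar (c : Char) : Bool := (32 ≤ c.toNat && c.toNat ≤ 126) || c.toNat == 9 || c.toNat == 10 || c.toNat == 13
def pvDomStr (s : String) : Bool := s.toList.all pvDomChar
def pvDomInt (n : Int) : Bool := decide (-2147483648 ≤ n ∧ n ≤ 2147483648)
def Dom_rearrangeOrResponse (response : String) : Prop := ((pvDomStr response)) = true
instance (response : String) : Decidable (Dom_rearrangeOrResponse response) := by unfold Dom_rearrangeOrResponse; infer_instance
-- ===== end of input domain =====

-- B replaces A's open/close pairing plus index-jumping rescan by one depth-counter
-- pass that emits the top-level blobs directly (objective: alternative; intended as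
-- faster, but a timing run read only about 1.5x at the largest measured size).

-- ===== PORT A =====

-- first loop of findBrackets: collect the indices of opening and closing parentheses
def fbScan : List Char → List Int → List Int → Int → List Int × List Int
  | [], ob, cb, _ => (ob, cb)
  | t :: r, ob, cb, k =>
      fbScan r (if t = '(' then ob ++ [k] else ob) (if t = ')' then cb ++ [k] else cb) (k + 1)

-- inner 'for o in open_brac' loop with its break
def fbInner : List Int → Int → (Int × Int) → Int → (Int × Int) × Int
  | [], _, temp, tempO => (temp, tempO)
  | o :: r, c, temp, tempO => if o < c then fbInner r c (o, c) o else (temp, tempO)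

-- outer 'for c in close_brac' loop; none = the ValueError of open_brac.remove
def fbOuter : List Int → List Int → List (Int × Int) → (Int × Int) → Int → Option (List Int × List (Int × Int))
  | [], ob, pairs, _, _ => some (ob, pairs)
  | c :: cs, ob, pairs, temp, tempO =>
      let r := fbInner ob c temp tempO
      match PySem.List.remove? ob r.2 with
      | none => none
      | some ob' => fbOuter cs ob' (pairs ++ [r.1]) r.1 r.2

def findBracketsA (cs : List Char) : Option (Bool × List (Int × Int)) :=
  let oc := fbScan cs [] [] 0
  match fbOuter oc.2 oc.1 [] (-1, -1) (-1) with
  | none => none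
  | some (ob, pairs) => if ob.length ≠ 0 then some (false, []) else some (true, pairs)

-- 'for (o, c) in brackets: if i == o: … break'
def findPairA : List (Int × Int) → Int → Option (Int × Int)
  | [], _ => none
  | p :: r, i => if i = p.1 then some p else findPairA r i

-- the 'while i < len(response)' loop (fuel-bounded: Python loops forever in the
-- 'none' branch below, which Pre_ excludes)
def mainLoopA (cs : List Char) (br : List (Int × Int)) : Nat → Int → List (List Char) → List (List Char)
  | 0, _, acc => acc
  | f + 1, i, acc =>
      if i < (cs.length : Int) then
        match PySem.List.pyGet? cs i with
        | none => acc     -- unreachable: 0 ≤ i < len throughout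
        | some ch =>
            if ch = '(' then
              match findPairA br i with
              | some p => mainLoopA cs br f (p.2 + 1) (acc ++ [PySem.List.slice cs (some p.1) (some (p.2 + 1))])
              | none => mainLoopA cs br f i acc
            else if ch ≠ '/' then mainLoopA cs br f (i + 1) (acc ++ [[ch]])
            else mainLoopA cs br f (i + 1) acc
      else acc

def rearrangeOrResponse (response : String) : Int × String :=
  let cs := response.toList
  match findBracketsA cs with
  | none => ((cs.length : Int), "")   -- Python raises ValueError here (outside Pre_)
  | some br =>
      let tempArr := mainLoopA cs br.2 (cs.length + 1) 0 []
      let tempList := tempArr.map (fun b => ((b.length : Int), b))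
      let sortedL := PySem.List.sorted2 tempList (fun p => p.1) (fun p => p.2)
      let output := sortedL.foldl (fun out p => out ++ p.2 ++ ['/']) []
      ((cs.length : Int), String.ofList (PySem.List.slice output none (some (-1))))

-- ===== PORT B =====

-- one pass: depth counter, current blob, emitted blobs
def scanBlobs : List Char → Nat → List Char → List (List Char) → List (List Char)
  | [], _, _, acc => acc
  | ch :: r, 0, cur, acc =>
      if ch = '(' then scanBlobs r 1 ['('] acc
      else if ch ≠ '/' then scanBlobs r 0 cur (acc ++ [[ch]])
      else scanBlobs r 0 cur acc
  | ch :: r, d + 1, cur, acc =>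
      if ch = '(' then scanBlobs r (d + 2) (cur ++ [ch]) acc
      else if ch = ')' then
        (if d = 0 then scanBlobs r 0 [] (acc ++ [cur ++ [ch]]) else scanBlobs r d (cur ++ [ch]) acc)
      else scanBlobs r (d + 1) (cur ++ [ch]) acc

-- '/'.join
def joinSlash : List (List Char) → List Char
  | [] => []
  | [b] => b
  | b :: r => b ++ '/' :: joinSlash r

def rearrangeOrResponse_alt (response : String) : Int × String :=
  let cs := response.toList
  let blobs := scanBlobs cs 0 [] []
  let sortedB := PySem.List.sorted2 blobs (fun b => (b.length : Int)) (fun b => b)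
  ((cs.length : Int), String.ofList (joinSlash sortedB))

-- ===== PRECONDITION & SPEC =====

def pvDelta (c : Char) : Int := if c = '(' then 1 else if c = ')' then -1 else 0
def pvDsum (s : List Char) : Int := (s.map pvDelta).sum

-- Pre_ = exactly the inputs on which the Python A returns: the parentheses of the
-- string are balanced (no prefix has more closing than opening parentheses —
-- otherwise list.remove raises ValueError — and no opening parenthesis is left
-- unmatched — otherwise the while loop never terminates).
def Pre_rearrangeOrResponse (response : String) : Prop :=
  (∀ n ∈ List.range (response.toList.length + 1), 0 ≤ pvDsum (response.toList.take n)) ∧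
    pvDsum response.toList = 0
instance (response : String) : Decidable (Pre_rearrangeOrResponse response) := by
  unfold Pre_rearrangeOrResponse; infer_instance

def pvWitness_rearrangeOrResponse : String := "(ab)/c"

def Spec_rearrangeOrResponse (response : String) (out : Int × String) : Prop := out = rearrangeOrResponse_alt response
instance (response : String) (out : Int × String) : Decidable (Spec_rearrangeOrResponse response out) := by unfold Spec_rearrangeOrResponse; infer_instance

-- ===== CLAIM (what is proved, stated in full; the proofs are below) =====
def Claim_equal_rearrangeOrResponse : Prop := ∀ (response : String), Dom_rearrangeOrResponse response → Pre_rearrangeOrResponse response → Spec_rearrangeOrResponse response (rearrangeOrResponse response)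

-- ===== LEMMAS AND PROOFS =====

-- balancedness (unbounded-prefix form used by the proofs)
def pvBal (s : List Char) : Prop := (∀ n, 0 ≤ pvDsum (s.take n)) ∧ pvDsum s = 0

theorem pvDsum_nil : pvDsum [] = 0 := rfl
theorem pvDsum_cons (c : Char) (t : List Char) : pvDsum (c :: t) = pvDelta c + pvDsum t := by
  simp [pvDsum]
theorem pvDsum_append (a b : List Char) : pvDsum (a ++ b) = pvDsum a + pvDsum b := by
  simp [pvDsum]

theorem pre_iff_bal (response : String) :
    Pre_rearrangeOrResponse response ↔ pvBal response.toList := by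
  unfold Pre_rearrangeOrResponse pvBal
  constructor
  · rintro ⟨h1, h2⟩
    refine ⟨fun n => ?_, h2⟩
    by_cases hn : n ≤ response.toList.length
    · exact h1 n (List.mem_range.mpr (by omega))
    · rw [List.take_of_length_le (by omega)]
      omega
  · rintro ⟨h1, h2⟩
    exact ⟨fun n _ => h1 n, h2⟩

-- index (relative depth d) of the ')' closing the enclosing '('
def pvMatchIdx : List Char → Int → Option Nat
  | [], _ => none
  | c :: t, d => if d + pvDelta c < 0 then some 0 else (pvMatchIdx t (d + pvDelta c)).map (· + 1)

theorem pvMatchIdx_lt {t : List Char} {d : Int} {j : Nat} (h : pvMatchIdx t d = some j) :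
    j < t.length := by
  induction t generalizing d j with
  | nil => simp [pvMatchIdx] at h
  | cons c t ih =>
    rw [pvMatchIdx] at h
    split_ifs at h with hd
    · cases h; simp
    · obtain ⟨j', hj', rfl⟩ := Option.map_eq_some_iff.mp h
      have := ih hj'
      simp
      omega

theorem pvMatchIdx_append {u v : List Char} {d : Int}
    (hpre : ∀ m, 0 ≤ d + pvDsum (u.take m)) (htot : d + pvDsum u = 0) :
    pvMatchIdx (u ++ ')' :: v) d = some u.length := by
  induction u generalizing d with
  | nil =>
    have hd : d = 0 := by simpa [pvDsum] using htot
    subst hd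
    simp [pvMatchIdx, pvDelta]
  | cons c u ih =>
    have h1 : 0 ≤ d + pvDelta c := by
      have := hpre 1
      rw [List.take_succ_cons, List.take_zero, pvDsum_cons, pvDsum_nil] at this
      omega
    rw [List.cons_append, pvMatchIdx, if_neg (by omega)]
    rw [ih (fun m => by
          have := hpre (m + 1)
          rw [List.take_succ_cons, pvDsum_cons] at this
          omega)
        (by
          rw [pvDsum_cons] at htot
          omega)]
    simp

theorem pvDsum_take_succ {s : List Char} {n : Nat} (h : n < s.length) :
    pvDsum (s.take (n + 1)) = pvDsum (s.take n) + pvDelta s[n] := by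
  rw [List.take_succ_eq_append_getElem h, pvDsum_append]
  simp [pvDsum]

-- Dyck decomposition of a balanced '(' … string
theorem pvDecomp {t : List Char} (h : pvBal ('(' :: t)) :
    ∃ j, pvMatchIdx t 0 = some j ∧ j < t.length ∧ t = t.take j ++ ')' :: t.drop (j + 1) ∧
      pvBal (t.take j) ∧ pvBal (t.drop (j + 1)) := by
  have htot : pvDsum t = -1 := by
    have := h.2
    rw [pvDsum_cons] at this
    simp [pvDelta] at this
    omega
  have htlen : 0 < t.length := by
    rcases t with _ | _
    · simp [pvDsum] at htot
    · simp
  have hQex : ∃ n, pvDsum (t.take (n + 1)) < 0 := by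
    refine ⟨t.length - 1, ?_⟩
    rw [show t.length - 1 + 1 = t.length from by omega, List.take_length]
    omega
  set j := Nat.find hQex with hjdef
  have hQj : pvDsum (t.take (j + 1)) < 0 := Nat.find_spec hQex
  have hmin : ∀ m, m ≤ j → 0 ≤ pvDsum (t.take m) := by
    intro m hm
    cases m with
    | zero => simp [pvDsum]
    | succ m' =>
      have := Nat.find_min hQex (show m' < j from by omega)
      omega
  have hjlen : j < t.length := by
    by_contra hge
    push_neg at hge
    have h2 := Nat.find_min hQex (show t.length - 1 < j from by omega)
    rw [show t.length - 1 + 1 = t.length from by omega, List.take_length] at h2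
    omega
  have hstep := pvDsum_take_succ (s := t) hjlen
  have hdeltaCases : pvDelta t[j] = 1 ∨ pvDelta t[j] = -1 ∨ pvDelta t[j] = 0 := by
    unfold pvDelta
    split_ifs <;> simp
  have hj0 : pvDsum (t.take j) = 0 ∧ pvDelta t[j] = -1 := by
    have h1 := hmin j le_rfl
    omega
  have hclose : t[j] = ')' := by
    have h2 := hj0.2
    unfold pvDelta at h2
    by_cases ha : t[j] = '('
    · rw [if_pos ha] at h2
      omega
    · by_cases hb : t[j] = ')'
      · exact hb
      · rw [if_neg ha, if_neg hb] at h2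
        omega
  have hteq : t = t.take j ++ ')' :: t.drop (j + 1) := by
    conv_lhs => rw [← List.take_append_drop j t]
    congr 1
    rw [List.drop_eq_getElem_cons hjlen, hclose]
  have hdsum1 : pvDsum (t.take (j + 1)) = -1 := by omega
  have hbu : pvBal (t.take j) := by
    constructor
    · intro n
      rw [List.take_take]
      exact hmin (min n j) (by omega)
    · exact hj0.1
  have hbv : pvBal (t.drop (j + 1)) := by
    constructor
    · intro n
      have key : pvDsum ((t.drop (j + 1)).take n) = pvDsum (t.take (j + 1 + n)) - pvDsum (t.take (j + 1)) := by
        rw [List.take_add, pvDsum_append]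
        ring
      have hpref := h.1 (j + 1 + n + 1)
      rw [List.take_succ_cons, pvDsum_cons] at hpref
      have hdelta : pvDelta '(' = 1 := by simp [pvDelta]
      omega
    · have hsplit : pvDsum t = pvDsum (t.take (j + 1)) + pvDsum (t.drop (j + 1)) := by
        conv_lhs => rw [← List.take_append_drop (j + 1) t]
        rw [pvDsum_append]
      omega
  have hmidx : pvMatchIdx t 0 = some j := by
    conv_lhs => rw [hteq]
    have hlen : (t.take j).length = j := by
      simp [List.length_take]
      omega
    have := pvMatchIdx_append (u := t.take j) (v := t.drop (j + 1)) (d := 0)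
      (fun m => by have := hbu.1 m; omega) (by have := hbu.2; omega)
    rw [this, hlen]
  exact ⟨j, hmidx, hjlen, hteq, hbu, hbv⟩

theorem pvBal_cons_of_ne {c : Char} {t : List Char} (hcp : c ≠ '(') (hcq : c ≠ ')')
    (h : pvBal (c :: t)) : pvBal t := by
  have hd : pvDelta c = 0 := by simp [pvDelta, hcp, hcq]
  constructor
  · intro n
    have := h.1 (n + 1)
    rw [List.take_succ_cons, pvDsum_cons, hd] at this
    omega
  · have := h.2
    rw [pvDsum_cons, hd] at this
    omega

-- structural induction on balanced strings
theorem pvBal_ind (P : List Char → Prop) (h0 : P [])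
    (hc : ∀ c t, c ≠ '(' → c ≠ ')' → pvBal t → P t → P (c :: t))
    (hp : ∀ u v, pvBal u → pvBal v → P u → P v → P ('(' :: u ++ ')' :: v)) :
    ∀ s, pvBal s → P s := by
  have main : ∀ n (s : List Char), s.length ≤ n → pvBal s → P s := by
    intro n
    induction n with
    | zero =>
      intro s hs hb
      have : s = [] := List.eq_nil_of_length_eq_zero (by omega)
      subst this
      exact h0
    | succ n ih =>
      intro s hs hb
      match s with
      | [] => exact h0
      | c :: t =>
        by_cases hcp : c = '('
        · subst hcp
          obtain ⟨j, _, hjlen, hteq, hbu, hbv⟩ := pvDecomp hb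
          have hlt : (t.take j).length ≤ n := by
            simp at hs ⊢
            omega
          have hld : (t.drop (j + 1)).length ≤ n := by
            simp at hs ⊢
            omega
          have := hp _ _ hbu hbv (ih _ hlt hbu) (ih _ hld hbv)
          have heq2 : '(' :: t = '(' :: t.take j ++ ')' :: t.drop (j + 1) := by
            rw [List.cons_append, ← hteq]
          rw [heq2]
          exact this
        · by_cases hcq : c = ')'
          · exfalso
            have h1 := hb.1 1
            subst hcq
            rw [List.take_succ_cons, List.take_zero, pvDsum_cons, pvDsum_nil] at h1
            simp [pvDelta] at h1
          · have hbt := pvBal_cons_of_ne hcp hcq hb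
            exact hc c t hcp hcq hbt (ih t (by simp at hs; omega) hbt)
  intro s hb
  exact main s.length s le_rfl hb

-- the list of top-level blobs both programs build
def blobsSpec : List Char → List (List Char)
  | [] => []
  | c :: t =>
      if c = '(' then
        match pvMatchIdx t 0 with
        | some j => ('(' :: t.take j ++ [')']) :: blobsSpec (t.drop (j + 1))
        | none => []
      else if c = '/' then blobsSpec t else [c] :: blobsSpec t
  termination_by s => s.length
  decreasing_by all_goals (simp only [List.length_cons, List.length_drop, List.length_take]; omega)

-- the (open, close) pairs findBrackets produces on a balanced string
def pairShape : List Char → Int → List (Int × Int)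
  | [], _ => []
  | c :: t, k =>
      if c = '(' then
        match pvMatchIdx t 0 with
        | some j => pairShape (t.take j) (k + 1) ++ [(k, k + 1 + (j : Int))] ++ pairShape (t.drop (j + 1)) (k + 2 + (j : Int))
        | none => []
      else pairShape t (k + 1)
  termination_by s _ => s.length
  decreasing_by all_goals (simp only [List.length_cons, List.length_drop, List.length_take]; omega)

theorem blobsSpec_paren {u : List Char} (v : List Char) (hu : pvBal u) :
    blobsSpec ('(' :: u ++ ')' :: v) = ('(' :: u ++ [')']) :: blobsSpec v := by
  have hm := pvMatchIdx_append (u := u) (v := v) (d := 0)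
    (fun m => by have := hu.1 m; omega) (by have := hu.2; omega)
  have hts : (u ++ ')' :: v).take u.length = u := List.take_left ..
  have hds : (u ++ ')' :: v).drop (u.length + 1) = v := by
    rw [show u ++ ')' :: v = (u ++ [')']) ++ v from by simp,
        show u.length + 1 = (u ++ [')']).length from by simp]
    exact List.drop_left ..
  rw [List.cons_append]
  simp only [blobsSpec, hm, hts, hds]
  simp

theorem pairShape_paren {u : List Char} (v : List Char) (k : Int) (hu : pvBal u) :
    pairShape ('(' :: u ++ ')' :: v) k
      = pairShape u (k + 1) ++ [(k, k + 1 + (u.length : Int))] ++ pairShape v (k + 2 + (u.length : Int)) := by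
  have hm := pvMatchIdx_append (u := u) (v := v) (d := 0)
    (fun m => by have := hu.1 m; omega) (by have := hu.2; omega)
  have hts : (u ++ ')' :: v).take u.length = u := List.take_left ..
  have hds : (u ++ ')' :: v).drop (u.length + 1) = v := by
    rw [show u ++ ')' :: v = (u ++ [')']) ++ v from by simp,
        show u.length + 1 = (u ++ [')']).length from by simp]
    exact List.drop_left ..
  rw [List.cons_append]
  simp only [pairShape, hm, hts, hds]
  simp

theorem pairShape_bounds : ∀ (s : List Char) (k : Int) (p : Int × Int), p ∈ pairShape s k →
    k ≤ p.1 ∧ p.1 < p.2 ∧ p.2 < k + (s.length : Int) := by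
  intro s k
  induction s, k using pairShape.induct with
  | case1 k =>
    intro p hp
    simp [pairShape] at hp
  | case2 t k j hm ih1 ih2 =>
    intro p hp
    simp only [pairShape, hm] at hp
    simp only [List.mem_append, List.mem_singleton, if_pos] at hp
    have hjlt := pvMatchIdx_lt hm
    have hlt : (t.take j).length = j := by
      simp
      omega
    have hld : (t.drop (j + 1)).length = t.length - (j + 1) := by simp
    rcases hp with (hp | hp) | hp
    · obtain ⟨h1, h2, h3⟩ := ih1 p hp
      rw [hlt] at h3
      refine ⟨by omega, h2, ?_⟩
      simp only [List.length_cons]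
      push_cast
      omega
    · subst hp
      refine ⟨le_rfl, by omega, ?_⟩
      simp only [List.length_cons]
      push_cast
      omega
    · obtain ⟨h1, h2, h3⟩ := ih2 p hp
      rw [hld] at h3
      refine ⟨by omega, h2, ?_⟩
      simp only [List.length_cons] at h3 ⊢
      push_cast at h3 ⊢
      omega
  | case3 t k hm =>
    intro p hp
    simp [pairShape, hm] at hp
  | case4 c t k hc ih =>
    intro p hp
    rw [show pairShape (c :: t) k = pairShape t (k + 1) from by simp [pairShape, hc]] at hp
    obtain ⟨h1, h2, h3⟩ := ih p hp
    refine ⟨by omega, h2, ?_⟩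
    simp only [List.length_cons]
    push_cast
    omega

-- ---- A side ----

def pvOpens : List Char → Int → List Int
  | [], _ => []
  | c :: t, k => (if c = '(' then [k] else []) ++ pvOpens t (k + 1)
def pvCloses : List Char → Int → List Int
  | [], _ => []
  | c :: t, k => (if c = ')' then [k] else []) ++ pvCloses t (k + 1)

theorem fbScan_eq : ∀ (s : List Char) (ob cb : List Int) (k : Int),
    fbScan s ob cb k = (ob ++ pvOpens s k, cb ++ pvCloses s k) := by
  intro s
  induction s with
  | nil => intro ob cb k; simp [fbScan, pvOpens, pvCloses]
  | cons c t ih =>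
    intro ob cb k
    rw [fbScan, ih]
    simp [pvOpens, pvCloses]
    constructor <;> split_ifs <;> simp

theorem pvOpens_append : ∀ (a b : List Char) (k : Int),
    pvOpens (a ++ b) k = pvOpens a k ++ pvOpens b (k + (a.length : Int)) := by
  intro a
  induction a with
  | nil => intro b k; simp [pvOpens]
  | cons c t ih =>
    intro b k
    rw [List.cons_append, pvOpens, pvOpens, ih]
    simp only [List.length_cons]
    push_cast
    rw [show k + 1 + (t.length : Int) = k + ((t.length : Int) + 1) from by ring]
    simp
theorem pvCloses_append : ∀ (a b : List Char) (k : Int),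
    pvCloses (a ++ b) k = pvCloses a k ++ pvCloses b (k + (a.length : Int)) := by
  intro a
  induction a with
  | nil => intro b k; simp [pvCloses]
  | cons c t ih =>
    intro b k
    rw [List.cons_append, pvCloses, pvCloses, ih]
    simp only [List.length_cons]
    push_cast
    rw [show k + 1 + (t.length : Int) = k + ((t.length : Int) + 1) from by ring]
    simp

theorem pvOpens_bounds : ∀ (s : List Char) (k : Int) (x : Int), x ∈ pvOpens s k →
    k ≤ x ∧ x < k + (s.length : Int) := by
  intro s
  induction s with
  | nil => intro k x hx; simp [pvOpens] at hx
  | cons c t ih =>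
    intro k x hx
    rw [pvOpens] at hx
    simp only [List.mem_append] at hx
    simp only [List.length_cons]
    rcases hx with hx | hx
    · split_ifs at hx with hc
      · simp at hx
        subst hx
        push_cast
        omega
      · simp at hx
    · have := ih (k + 1) x hx
      push_cast
      omega
theorem fbInner_stop {R : List Int} {c : Int} (hR : ∀ x ∈ R, c ≤ x) (temp : Int × Int) (tempO : Int) :
    fbInner R c temp tempO = (temp, tempO) := by
  cases R with
  | nil => rfl
  | cons r R' =>
    rw [fbInner, if_neg]
    have := hR r (by simp)
    omega

theorem fbInner_mid {L R : List Int} {m c : Int} (hL : ∀ x ∈ L, x < c) (hm : m < c)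
    (hR : ∀ x ∈ R, c ≤ x) (temp : Int × Int) (tempO : Int) :
    fbInner (L ++ m :: R) c temp tempO = ((m, c), m) := by
  induction L generalizing temp tempO with
  | nil =>
    rw [List.nil_append, fbInner, if_pos hm]
    exact fbInner_stop hR _ _
  | cons l L' ih =>
    rw [List.cons_append, fbInner, if_pos (hL l (by simp))]
    exact ih (fun x hx => hL x (by simp [hx])) _ _

theorem remove_mid {L R : List Int} {m : Int} (hL : ∀ x ∈ L, x ≠ m) :
    PySem.List.remove? (L ++ m :: R) m = some (L ++ R) := by
  induction L with
  | nil => simp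
  | cons l L' ih =>
    rw [List.cons_append, PySem.List.remove?_cons_of_ne _ (hL l (by simp)),
        ih (fun x hx => hL x (by simp [hx]))]
    simp

theorem fbOuter_step {ob : List Int} {c : Int} {temp temp' : Int × Int} {tempO tempO' : Int}
    {ob' : List Int} (hInner : fbInner ob c temp tempO = (temp', tempO'))
    (hRem : PySem.List.remove? ob tempO' = some ob') (cs : List Int) (pairs : List (Int × Int)) :
    fbOuter (c :: cs) ob pairs temp tempO = fbOuter cs ob' (pairs ++ [temp']) temp' tempO' := by
  simp only [fbOuter]
  rw [hInner]
  simp [hRem]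

theorem fbOuter_balanced : ∀ (u : List Char), pvBal u → ∀ (k : Int) (L R rest : List Int)
    (pairs : List (Int × Int)) (temp : Int × Int) (tempO : Int),
    (∀ x ∈ L, x < k) → (∀ x ∈ R, k + (u.length : Int) ≤ x) →
    ∃ temp' tempO', fbOuter (pvCloses u k ++ rest) (L ++ pvOpens u k ++ R) pairs temp tempO
      = fbOuter rest (L ++ R) (pairs ++ pairShape u k) temp' tempO' := by
  intro u hu
  refine pvBal_ind (fun u => ∀ (k : Int) (L R rest : List Int) (pairs : List (Int × Int))
      (temp : Int × Int) (tempO : Int),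
      (∀ x ∈ L, x < k) → (∀ x ∈ R, k + (u.length : Int) ≤ x) →
      ∃ temp' tempO', fbOuter (pvCloses u k ++ rest) (L ++ pvOpens u k ++ R) pairs temp tempO
        = fbOuter rest (L ++ R) (pairs ++ pairShape u k) temp' tempO') ?_ ?_ ?_ u hu
  · intro k L R rest pairs temp tempO hL hR
    exact ⟨temp, tempO, by simp [pvCloses, pvOpens, pairShape]⟩
  · intro c t hcp hcq hbt ih k L R rest pairs temp tempO hL hR
    rw [show pvCloses (c :: t) k = pvCloses t (k + 1) from by simp [pvCloses, hcq],
        show pvOpens (c :: t) k = pvOpens t (k + 1) from by simp [pvOpens, hcp],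
        show pairShape (c :: t) k = pairShape t (k + 1) from by simp [pairShape, hcp]]
    exact ih (k + 1) L R rest pairs temp tempO (fun x hx => by have := hL x hx; omega)
      (fun x hx => by
        have := hR x hx
        simp only [List.length_cons] at this
        push_cast at this ⊢
        omega)
  · intro a b hba hbb iha ihb k L R rest pairs temp tempO hL hR
    have hlen : (('(' :: a ++ ')' :: b).length : Int) = (a.length : Int) + (b.length : Int) + 2 := by
      simp
      push_cast
      ring
    have ho : pvOpens ('(' :: a ++ ')' :: b) k
        = k :: (pvOpens a (k + 1) ++ pvOpens b (k + 2 + (a.length : Int))) := by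
      rw [List.cons_append,
          show pvOpens ('(' :: (a ++ ')' :: b)) k = [k] ++ pvOpens (a ++ ')' :: b) (k + 1) from by
            simp [pvOpens],
          pvOpens_append,
          show pvOpens (')' :: b) (k + 1 + (a.length : Int))
            = pvOpens b (k + 1 + (a.length : Int) + 1) from by simp [pvOpens],
          show k + 1 + (a.length : Int) + 1 = k + 2 + (a.length : Int) from by ring]
      simp
    have hc2 : pvCloses ('(' :: a ++ ')' :: b) k
        = pvCloses a (k + 1) ++ ((k + 1 + (a.length : Int)) :: pvCloses b (k + 2 + (a.length : Int))) := by
      rw [List.cons_append,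
          show pvCloses ('(' :: (a ++ ')' :: b)) k = pvCloses (a ++ ')' :: b) (k + 1) from by
            simp [pvCloses],
          pvCloses_append,
          show pvCloses (')' :: b) (k + 1 + (a.length : Int))
            = (k + 1 + (a.length : Int)) :: pvCloses b (k + 1 + (a.length : Int) + 1) from by
            simp [pvCloses],
          show k + 1 + (a.length : Int) + 1 = k + 2 + (a.length : Int) from by ring]
    obtain ⟨t1, o1, h1⟩ := iha (k + 1) (L ++ [k]) (pvOpens b (k + 2 + (a.length : Int)) ++ R)
      ((k + 1 + (a.length : Int)) :: (pvCloses b (k + 2 + (a.length : Int)) ++ rest)) pairs temp tempO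
      (fun x hx => by
        rcases List.mem_append.mp hx with hx | hx
        · have := hL x hx; omega
        · simp at hx; omega)
      (fun x hx => by
        rcases List.mem_append.mp hx with hx | hx
        · have := (pvOpens_bounds b _ x hx).1
          push_cast at this ⊢
          omega
        · have := hR x hx
          rw [hlen] at this
          push_cast at this ⊢
          omega)
    rw [hc2, ho]
    simp only [List.append_assoc, List.cons_append, List.nil_append] at h1 ⊢
    rw [h1]
    have hstep := fbOuter_step
      (fbInner_mid (L := L) (m := k) (R := pvOpens b (k + 2 + (a.length : Int)) ++ R)
        (c := k + 1 + (a.length : Int))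
        (fun x hx => by have := hL x hx; omega)
        (by omega)
        (fun x hx => by
          rcases List.mem_append.mp hx with hx | hx
          · have := (pvOpens_bounds b _ x hx).1; omega
          · have := hR x hx
            rw [hlen] at this
            omega)
        t1 o1)
      (remove_mid (fun x hx => by have := hL x hx; omega))
      (pvCloses b (k + 2 + (a.length : Int)) ++ rest) (pairs ++ pairShape a (k + 1))
    rw [hstep]
    obtain ⟨t2, o2, h2⟩ := ihb (k + 2 + (a.length : Int)) L R rest
      (pairs ++ pairShape a (k + 1) ++ [(k, k + 1 + (a.length : Int))])
      (k, k + 1 + (a.length : Int)) k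
      (fun x hx => by have := hL x hx; omega)
      (fun x hx => by
        have := hR x hx
        rw [hlen] at this
        push_cast at this ⊢
        omega)
    refine ⟨t2, o2, ?_⟩
    simp only [List.append_assoc, List.cons_append, List.nil_append] at h2 ⊢
    rw [h2, show pairShape ('(' :: (a ++ ')' :: b)) k
      = pairShape a (k + 1) ++ [(k, k + 1 + (a.length : Int))] ++ pairShape b (k + 2 + (a.length : Int))
      from by rw [← List.cons_append, pairShape_paren b k hba]]
    simp [List.append_assoc]

theorem findBrackets_balanced {s : List Char} (h : pvBal s) :
    findBracketsA s = some (true, pairShape s 0) := by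
  obtain ⟨t', o', h1⟩ := fbOuter_balanced s h 0 [] [] [] [] (-1, -1) (-1)
    (by simp) (by simp)
  simp only [List.nil_append, List.append_nil] at h1
  rw [show findBracketsA s = (match fbOuter (pvCloses s 0) (pvOpens s 0) [] (-1, -1) (-1) with
      | none => none
      | some (ob, pairs) => if ob.length ≠ 0 then some (false, []) else some (true, pairs)) from by
    simp only [findBracketsA, fbScan_eq]
    rfl]
  rw [h1]
  simp [fbOuter]

theorem findPairA_skip {ps : List (Int × Int)} {i : Int} :
    ∀ {Bp : List (Int × Int)}, (∀ p ∈ Bp, p.1 ≠ i) → findPairA (Bp ++ ps) i = findPairA ps i := by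
  intro Bp
  induction Bp with
  | nil => intro _; simp
  | cons p Bp' ih =>
    intro h
    rw [List.cons_append, findPairA, if_neg (fun he => h p (by simp) he.symm)]
    exact ih (fun q hq => h q (by simp [hq]))

theorem mainLoopA_succ (cs : List Char) (br : List (Int × Int)) (f : Nat) (i : Int)
    (acc : List (List Char)) :
    mainLoopA cs br (f + 1) i acc =
      if i < (cs.length : Int) then
        match PySem.List.pyGet? cs i with
        | none => acc
        | some ch =>
            if ch = '(' then
              match findPairA br i with
              | some p => mainLoopA cs br f (p.2 + 1) (acc ++ [PySem.List.slice cs (some p.1) (some (p.2 + 1))])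
              | none => mainLoopA cs br f i acc
            else if ch ≠ '/' then mainLoopA cs br f (i + 1) (acc ++ [[ch]])
            else mainLoopA cs br f (i + 1) acc
      else acc := rfl

theorem mainLoopA_step_char {cs : List Char} {br : List (Int × Int)} {f : Nat} {i : Int}
    {ch : Char} (acc : List (List Char)) (hlt : i < (cs.length : Int))
    (hget : PySem.List.pyGet? cs i = some ch) (hcp : ch ≠ '(') :
    mainLoopA cs br (f + 1) i acc =
      if ch ≠ '/' then mainLoopA cs br f (i + 1) (acc ++ [[ch]])
      else mainLoopA cs br f (i + 1) acc := by
  rw [mainLoopA_succ, if_pos hlt, hget]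
  simp only [if_neg hcp]

theorem mainLoopA_step_paren {cs : List Char} {br : List (Int × Int)} {f : Nat} {i : Int}
    {p : Int × Int} (acc : List (List Char)) (hlt : i < (cs.length : Int))
    (hget : PySem.List.pyGet? cs i = some '(') (hfind : findPairA br i = some p) :
    mainLoopA cs br (f + 1) i acc
      = mainLoopA cs br f (p.2 + 1) (acc ++ [PySem.List.slice cs (some p.1) (some (p.2 + 1))]) := by
  rw [mainLoopA_succ, if_pos hlt, hget]
  show (if '(' = '(' then _ else _) = _
  rw [if_pos rfl, hfind]

theorem mainLoopA_spec : ∀ (s : List Char), pvBal s → ∀ (P : List Char) (Bp : List (Int × Int))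
    (acc : List (List Char)) (fuel : Nat),
    s.length + 1 ≤ fuel → (∀ p ∈ Bp, p.1 < (P.length : Int)) →
    mainLoopA (P ++ s) (Bp ++ pairShape s (P.length : Int)) fuel (P.length : Int) acc
      = acc ++ blobsSpec s := by
  intro s hs
  refine pvBal_ind (fun s => ∀ (P : List Char) (Bp : List (Int × Int)) (acc : List (List Char))
      (fuel : Nat), s.length + 1 ≤ fuel → (∀ p ∈ Bp, p.1 < (P.length : Int)) →
      mainLoopA (P ++ s) (Bp ++ pairShape s (P.length : Int)) fuel (P.length : Int) acc
        = acc ++ blobsSpec s) ?_ ?_ ?_ s hs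
  · intro P Bp acc fuel hf hBp
    obtain ⟨f, rfl⟩ : ∃ f, fuel = f + 1 := ⟨fuel - 1, by omega⟩
    rw [mainLoopA_succ, if_neg (by simp)]
    simp [blobsSpec]
  · intro c t hcp hcq hbt ih P Bp acc fuel hf hBp
    obtain ⟨f, rfl⟩ : ∃ f, fuel = f + 1 := ⟨fuel - 1, by omega⟩
    rw [mainLoopA_step_char acc (by simp) (PySem.List.pyGet?_append_length ..) hcp]
    rw [show pairShape (c :: t) (P.length : Int) = pairShape t ((P.length : Int) + 1) from by
      simp [pairShape, hcp]]
    have harg : P ++ c :: t = (P ++ [c]) ++ t := by simp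
    have hlen2 : ((P ++ [c]).length : Int) = (P.length : Int) + 1 := by simp
    have hBp' : ∀ p ∈ Bp, p.1 < (((P ++ [c]).length : Nat) : Int) := by
      intro p hp
      have := hBp p hp
      simp
      omega
    have hf' : t.length + 1 ≤ f := by
      simp at hf
      omega
    by_cases hcs : c = '/'
    · subst hcs
      rw [if_neg (by simp), harg, ← hlen2, ih (P ++ ['/']) Bp acc f hf' hBp']
      rw [show blobsSpec ('/' :: t) = blobsSpec t from by simp [blobsSpec]]
    · rw [if_pos hcs, harg, ← hlen2, ih (P ++ [c]) Bp (acc ++ [[c]]) f hf' hBp']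
      rw [show blobsSpec (c :: t) = [c] :: blobsSpec t from by simp [blobsSpec, hcp, hcs]]
      simp
  · intro a b hba hbb iha ihb P Bp acc fuel hf hBp
    obtain ⟨f, rfl⟩ : ∃ f, fuel = f + 1 := ⟨fuel - 1, by omega⟩
    have e1 : ('(' :: a ++ ')' :: b) = '(' :: (a ++ ')' :: b) := by simp
    have hps : pairShape ('(' :: a ++ ')' :: b) (P.length : Int)
        = pairShape a ((P.length : Int) + 1) ++ [((P.length : Int), (P.length : Int) + 1 + (a.length : Int))]
          ++ pairShape b ((P.length : Int) + 2 + (a.length : Int)) :=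
      pairShape_paren b (P.length : Int) hba
    have hget : PySem.List.pyGet? (P ++ ('(' :: a ++ ')' :: b)) (P.length : Int) = some '(' := by
      rw [e1]
      exact PySem.List.pyGet?_append_length ..
    have hfind : findPairA (Bp ++ pairShape ('(' :: a ++ ')' :: b) (P.length : Int)) (P.length : Int)
        = some ((P.length : Int), (P.length : Int) + 1 + (a.length : Int)) := by
      rw [hps, show Bp ++ (pairShape a ((P.length : Int) + 1)
            ++ [((P.length : Int), (P.length : Int) + 1 + (a.length : Int))]
            ++ pairShape b ((P.length : Int) + 2 + (a.length : Int)))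
          = (Bp ++ pairShape a ((P.length : Int) + 1))
            ++ (((P.length : Int), (P.length : Int) + 1 + (a.length : Int))
              :: pairShape b ((P.length : Int) + 2 + (a.length : Int))) from by simp]
      rw [findPairA_skip (fun p hp => ?_), findPairA, if_pos rfl]
      rcases List.mem_append.mp hp with hp | hp
      · have := hBp p hp
        omega
      · have := (pairShape_bounds a ((P.length : Int) + 1) p hp).1
        omega
    rw [mainLoopA_step_paren acc (by simp; omega) hget hfind]
    have hsl : PySem.List.slice (P ++ ('(' :: a ++ ')' :: b)) (some (P.length : Int))
        (some (((P.length : Int) + 1 + (a.length : Int)) + 1)) = '(' :: (a ++ [')']) := by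
      rw [show (((P.length : Int) + 1 + (a.length : Int)) + 1)
          = ((P.length : Int) + ((a.length + 2 : Nat) : Int)) from by push_cast; ring]
      rw [PySem.List.slice_natCast_add, e1, List.drop_left]
      rw [show a.length + 2 = (a.length + 1) + 1 from rfl, List.take_succ_cons]
      congr 1
      rw [show a.length + 1 = a.length + 1 from rfl, List.take_length_add_append]
      simp
    rw [hsl]
    have harg : P ++ ('(' :: a ++ ')' :: b) = (P ++ ('(' :: (a ++ [')']))) ++ b := by
      simp
    have hlen2 : (((P ++ ('(' :: (a ++ [')']))).length : Nat) : Int)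
        = (P.length : Int) + 2 + (a.length : Int) := by
      simp
      push_cast
      ring
    have hidx : ((P.length : Int) + 1 + (a.length : Int)) + 1
        = (((P ++ ('(' :: (a ++ [')']))).length : Nat) : Int) := by
      rw [hlen2]
      ring
    have hbrk : Bp ++ pairShape ('(' :: a ++ ')' :: b) (P.length : Int)
        = (Bp ++ pairShape a ((P.length : Int) + 1)
            ++ [((P.length : Int), (P.length : Int) + 1 + (a.length : Int))])
          ++ pairShape b ((((P ++ ('(' :: (a ++ [')']))).length : Nat) : Int)) := by
      rw [hps, hlen2]
      simp
    have hBp' : ∀ p ∈ Bp ++ pairShape a ((P.length : Int) + 1)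
        ++ [((P.length : Int), (P.length : Int) + 1 + (a.length : Int))],
        p.1 < (((P ++ ('(' :: (a ++ [')']))).length : Nat) : Int) := by
      intro p hp
      rw [hlen2]
      rcases List.mem_append.mp hp with hp | hp
      · rcases List.mem_append.mp hp with hp | hp
        · have := hBp p hp
          omega
        · have h3 := pairShape_bounds a ((P.length : Int) + 1) p hp
          omega
      · simp at hp
        subst hp
        simp
        omega
    have hf' : b.length + 1 ≤ f := by
      simp at hf
      omega
    rw [hbrk, harg, hidx, ihb (P ++ ('(' :: (a ++ [')']))) _ _ f hf' hBp']
    rw [blobsSpec_paren b hba]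
    simp

-- ---- B side ----

theorem scanBlobs_cons_zero (ch : Char) (r cur : List Char) (acc : List (List Char)) :
    scanBlobs (ch :: r) 0 cur acc =
      if ch = '(' then scanBlobs r 1 ['('] acc
      else if ch ≠ '/' then scanBlobs r 0 cur (acc ++ [[ch]])
      else scanBlobs r 0 cur acc := rfl

theorem scanBlobs_cons_pos (ch : Char) (r cur : List Char) (d : Nat) (acc : List (List Char)) :
    scanBlobs (ch :: r) (d + 1) cur acc =
      if ch = '(' then scanBlobs r (d + 2) (cur ++ [ch]) acc
      else if ch = ')' then
        (if d = 0 then scanBlobs r 0 [] (acc ++ [cur ++ [ch]]) else scanBlobs r d (cur ++ [ch]) acc)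
      else scanBlobs r (d + 1) (cur ++ [ch]) acc := rfl

theorem scanBlobs_inner : ∀ (u : List Char), pvBal u → ∀ (rest : List Char) (d : Nat)
    (cur : List Char) (acc : List (List Char)),
    scanBlobs (u ++ rest) (d + 1) cur acc = scanBlobs rest (d + 1) (cur ++ u) acc := by
  intro u hu
  refine pvBal_ind (fun u => ∀ (rest : List Char) (d : Nat) (cur : List Char) (acc : List (List Char)),
      scanBlobs (u ++ rest) (d + 1) cur acc = scanBlobs rest (d + 1) (cur ++ u) acc) ?_ ?_ ?_ u hu
  · intro rest d cur acc
    simp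
  · intro c t hcp hcq _ ih rest d cur acc
    rw [List.cons_append, scanBlobs_cons_pos, if_neg hcp, if_neg hcq, ih]
    simp
  · intro a b hba hbb iha ihb rest d cur acc
    have e1 : ('(' :: a ++ ')' :: b) ++ rest = '(' :: (a ++ (')' :: (b ++ rest))) := by simp
    rw [e1, scanBlobs_cons_pos, if_pos rfl]
    rw [show d + 2 = (d + 1) + 1 from rfl, iha]
    rw [scanBlobs_cons_pos, if_neg (by decide), if_pos rfl, if_neg (Nat.succ_ne_zero d)]
    rw [ihb]
    congr 1
    simp

theorem scanBlobs_spec : ∀ (s : List Char), pvBal s → ∀ (cur : List Char) (acc : List (List Char)),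
    scanBlobs s 0 cur acc = acc ++ blobsSpec s := by
  intro s hs
  refine pvBal_ind (fun s => ∀ (cur : List Char) (acc : List (List Char)),
      scanBlobs s 0 cur acc = acc ++ blobsSpec s) ?_ ?_ ?_ s hs
  · intro cur acc
    simp [scanBlobs, blobsSpec]
  · intro c t hcp hcq hbt ih cur acc
    rw [scanBlobs_cons_zero, if_neg hcp]
    by_cases hcs : c = '/'
    · subst hcs
      rw [if_neg (by simp), ih]
      rw [show blobsSpec ('/' :: t) = blobsSpec t from by simp [blobsSpec]]
    · rw [if_pos hcs, ih]
      rw [show blobsSpec (c :: t) = [c] :: blobsSpec t from by simp [blobsSpec, hcp, hcs]]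
      simp
  · intro a b hba hbb iha ihb cur acc
    have e1 : ('(' :: a ++ ')' :: b) = '(' :: (a ++ ')' :: b) := by simp
    rw [e1, scanBlobs_cons_zero, if_pos rfl]
    rw [show (1 : Nat) = 0 + 1 from rfl, scanBlobs_inner a hba]
    rw [scanBlobs_cons_pos, if_neg (by decide), if_pos rfl, if_pos rfl]
    rw [ihb, ← e1, blobsSpec_paren b hba]
    simp

-- ---- sort and join ----

theorem insertBy_map {α β : Type} (f : α → β) (bfA : β → β → Bool) (bfB : α → α → Bool)
    (hbf : ∀ a b, bfA (f a) (f b) = bfB a b) (x : α) :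
    ∀ ys : List α, PySem.List.insertBy bfA (f x) (ys.map f) = (PySem.List.insertBy bfB x ys).map f := by
  intro ys
  induction ys with
  | nil => simp [PySem.List.insertBy]
  | cons y ys ih =>
    rw [List.map_cons,
        show PySem.List.insertBy bfA (f x) (f y :: ys.map f)
          = if bfA (f x) (f y) then f x :: f y :: ys.map f else f y :: PySem.List.insertBy bfA (f x) (ys.map f)
          from by simp [PySem.List.insertBy],
        show PySem.List.insertBy bfB x (y :: ys)
          = if bfB x y then x :: y :: ys else y :: PySem.List.insertBy bfB x ys
          from by simp [PySem.List.insertBy],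
        hbf]
    split_ifs with h
    · simp
    · simp [ih]

theorem foldl_insertBy_map {α β : Type} (f : α → β) (bfA : β → β → Bool) (bfB : α → α → Bool)
    (hbf : ∀ a b, bfA (f a) (f b) = bfB a b) :
    ∀ (l : List α) (acc : List α),
      (l.map f).foldl (fun a x => PySem.List.insertBy bfA x a) (acc.map f)
        = ((l.foldl (fun a x => PySem.List.insertBy bfB x a) acc).map f) := by
  intro l
  induction l with
  | nil => intro acc; simp
  | cons x l ih =>
    intro acc
    rw [List.map_cons, List.foldl_cons, List.foldl_cons, insertBy_map f bfA bfB hbf x acc, ih]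

theorem map_snd_sorted2 (l : List (List Char)) :
    (PySem.List.sorted2 (l.map (fun b => ((b.length : Int), b))) (fun p => p.1) (fun p => p.2)).map Prod.snd
      = PySem.List.sorted2 l (fun b => (b.length : Int)) (fun b => b) := by
  have h := foldl_insertBy_map (f := fun b : List Char => ((b.length : Int), b))
      (bfA := fun a b => decide (a.1 < b.1) || (!decide (b.1 < a.1) && decide (a.2 < b.2)))
      (bfB := fun a b => decide ((a.length : Int) < (b.length : Int)) ||
        (!decide ((b.length : Int) < (a.length : Int)) && decide (a < b)))
      (fun a b => rfl) l []
  simp only [List.map_nil] at h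
  simp only [PySem.List.sorted2, if_neg (by decide : ¬ (false = true))]
  rw [h, List.map_map]
  rw [show (Prod.snd ∘ fun b : List Char => ((b.length : Int), b)) = id from rfl, List.map_id]

theorem dropLast_flatMap_joinSlash : ∀ bs : List (List Char),
    (bs.flatMap (fun b => b ++ ['/'])).dropLast = joinSlash bs := by
  intro bs
  induction bs with
  | nil => rfl
  | cons b rest ih =>
    cases rest with
    | nil => simp [joinSlash]
    | cons r rs =>
      rw [show joinSlash (b :: r :: rs) = b ++ '/' :: joinSlash (r :: rs) from rfl]
      rw [List.flatMap_cons]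
      rw [List.dropLast_append_of_ne_nil (by simp), ih]
      simp

theorem output_join (l : List (Int × List Char)) :
    PySem.List.slice (l.foldl (fun out p => out ++ p.2 ++ ['/']) []) none (some (-1))
      = joinSlash (l.map Prod.snd) := by
  rw [PySem.List.slice_to_neg_one,
      show (fun (out : List Char) (p : Int × List Char) => out ++ p.2 ++ ['/'])
        = fun out p => out ++ (p.2 ++ ['/']) from by funext out p; rw [List.append_assoc],
      PySem.List.foldl_append_eq_flatMap (g := fun p : Int × List Char => p.2 ++ ['/']),
      List.nil_append]
  rw [show (l.flatMap fun p => p.2 ++ ['/']) = (l.map Prod.snd).flatMap (fun b => b ++ ['/'])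
      from by rw [List.flatMap_map]]
  exact dropLast_flatMap_joinSlash _

-- ===== VERDICT (by name: the statement is the Claim_ definition above) =====
theorem rearrangeOrResponse_spec : Claim_equal_rearrangeOrResponse := by
  intro response hdom hpre
  unfold Spec_rearrangeOrResponse
  have hb : pvBal response.toList := (pre_iff_bal response).mp hpre
  have hm := mainLoopA_spec response.toList hb [] [] [] (response.toList.length + 1)
    (by omega) (by simp)
  simp only [List.nil_append, List.length_nil, Nat.cast_zero] at hm
  have hscan := scanBlobs_spec response.toList hb [] []
  simp only [List.nil_append] at hscan
  simp only [rearrangeOrResponse, rearrangeOrResponse_alt]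
  rw [findBrackets_balanced hb]
  simp only [hm, hscan, output_join, map_snd_sorted2]
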